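-- pv_equiv track=rewrite | github.com/ElizabethViera/AdventOfCode | AdventOfCode2016/Day 13/Day13.py | isWall
-- ===== SOURCE A (Python) =====
-- def isWall(x,y):
--     n = x*x + 3*x + 2*x*y + y + y*y
--     n += 1362
--     n = str(bin(n))
--     ones = 0
--     for c in n:
--         if c == '1':
--             ones += 1
--     return ones%2 == 1
-- ===== SOURCE B (Python) =====
-- def isWall(x, y):
--     n = x*x + 3*x + 2*x*y + y + y*y + 1362
--     c = abs(n)
--     ones = 0
--     while c:
--         ones += 1
--         c &= c - 1
--     return ones % 2 == 1
-- ===== Notes on version B (the rewrite author's own statement) =====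
-- stated objective: idiomatic
-- what changed: Counts set bits with Kernighan's clear-lowest-bit loop on abs(n) instead of formatting bin(n) to a string and scanning its characters for '1'.
import Mathlib
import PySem

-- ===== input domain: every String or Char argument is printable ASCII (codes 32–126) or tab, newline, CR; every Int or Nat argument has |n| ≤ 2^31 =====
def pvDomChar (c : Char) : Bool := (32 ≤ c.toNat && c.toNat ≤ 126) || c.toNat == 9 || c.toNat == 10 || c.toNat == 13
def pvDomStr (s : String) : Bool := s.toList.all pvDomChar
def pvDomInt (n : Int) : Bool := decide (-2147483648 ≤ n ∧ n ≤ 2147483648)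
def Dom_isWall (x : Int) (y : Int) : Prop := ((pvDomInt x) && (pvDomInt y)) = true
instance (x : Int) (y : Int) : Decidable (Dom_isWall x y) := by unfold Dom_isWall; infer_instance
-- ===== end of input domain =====

-- B replaces A's bin(n)-string scan by Kernighan's clear-lowest-set-bit loop on abs(n) (idiomatic; return value identical).

-- ===== PORT A =====
-- binary digits of m, most significant first (hand port of Python's bin magnitude digits; exact for m > 0)
def pvBinDigits (m : Nat) : List Char :=
  if m = 0 then []
  else pvBinDigits (m / 2) ++ [if m % 2 = 1 then '1' else '0']
decreasing_by exact Nat.div_lt_self (Nat.pos_of_ne_zero (by assumption)) (by norm_num)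

-- hand port of Python's bin(n): "-0b…" for negative n, "0b0" for 0; exact on all Int
def pvBin (n : Int) : List Char :=
  (if n < 0 then ['-', '0', 'b'] else ['0', 'b']) ++
  (if n.natAbs = 0 then ['0'] else pvBinDigits n.natAbs)

def isWall (x : Int) (y : Int) : Bool :=
  let n := x * x + 3 * x + 2 * x * y + y + y * y
  let n := n + 1362
  let s := pvBin n          -- n = str(bin(n))
  let ones := s.foldl (fun ones c => if c = '1' then ones + 1 else ones) 0
  ones % 2 == 1

-- ===== PORT B =====
-- while c: ones += 1; c &= c - 1
def pvKern (c : Nat) (ones : Nat) : Nat :=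
  if c = 0 then ones else pvKern (c &&& (c - 1)) (ones + 1)
decreasing_by
  exact Nat.lt_of_le_of_lt (Nat.and_le_right) (Nat.pred_lt (by assumption))

def isWall_alt (x : Int) (y : Int) : Bool :=
  let n := x * x + 3 * x + 2 * x * y + y + y * y + 1362
  let c := n.natAbs
  pvKern c 0 % 2 == 1

-- ===== PRECONDITION & SPEC =====
def Spec_isWall (x : Int) (y : Int) (out : Bool) : Prop := out = isWall_alt x y
instance (x : Int) (y : Int) (out : Bool) : Decidable (Spec_isWall x y out) := by unfold Spec_isWall; infer_instance

-- ===== CLAIM (what is proved, stated in full; the proofs are below) =====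
def Claim_equal_isWall : Prop := ∀ (x : Int) (y : Int), Dom_isWall x y → Spec_isWall x y (isWall x y)

-- ===== LEMMAS AND PROOFS =====

-- popcount by halving: the common reference both ports are reduced to
def pvCnt (m : Nat) : Nat :=
  if m = 0 then 0 else pvCnt (m / 2) + m % 2
decreasing_by exact Nat.div_lt_self (Nat.pos_of_ne_zero (by assumption)) (by norm_num)

theorem foldl_binDigits (m : Nat) : ∀ acc : Nat,
    (pvBinDigits m).foldl (fun ones c => if c = '1' then ones + 1 else ones) acc = acc + pvCnt m := by
  induction m using Nat.strong_induction_on with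
  | _ m ih =>
    intro acc
    rw [pvBinDigits, pvCnt]
    by_cases h : m = 0
    · simp [h]
    · rw [if_neg h, if_neg h, List.foldl_append,
        ih (m / 2) (Nat.div_lt_self (Nat.pos_of_ne_zero h) (by norm_num))]
      rcases Nat.mod_two_eq_zero_or_one m with h2 | h2 <;> simp [h2] <;> omega

theorem cnt_odd (k : Nat) : pvCnt (2 * k + 1) = pvCnt k + 1 := by
  rw [pvCnt]; simp [Nat.mul_add_div]

theorem cnt_even (k : Nat) : pvCnt (2 * k) = pvCnt k := by
  by_cases h : k = 0
  · simp [h]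
  · rw [pvCnt, if_neg (by omega : ¬ 2 * k = 0)]
    have h1 : 2 * k / 2 = k := by omega
    have h2 : 2 * k % 2 = 0 := by omega
    rw [h1, h2, Nat.add_zero]

theorem land_odd (k : Nat) : (2 * k + 1) &&& (2 * k) = 2 * k := by
  apply Nat.eq_of_testBit_eq
  intro i
  cases i with
  | zero => simp [Nat.testBit_zero]
  | succ i =>
    rw [Nat.testBit_and]
    simp only [Nat.testBit_succ]
    have h1 : (2 * k + 1) / 2 = k := by omega
    have h2 : (2 * k) / 2 = k := by omega
    rw [h1, h2, Bool.and_self]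

theorem land_even (k : Nat) : (2 * k) &&& (2 * k - 1) = 2 * (k &&& (k - 1)) := by
  apply Nat.eq_of_testBit_eq
  intro i
  cases i with
  | zero =>
    simp only [Nat.testBit_and]
    have : 2 * k % 2 = 0 := Nat.mul_mod_right 2 k
    simp [this, Nat.mul_mod_right]
  | succ i =>
    rw [Nat.testBit_and]
    simp only [Nat.testBit_succ]
    have h1 : (2 * k) / 2 = k := by omega
    have h2 : (2 * k - 1) / 2 = k - 1 := by omega
    have h3 : (2 * (k &&& (k - 1))) / 2 = k &&& (k - 1) := by omega
    rw [h1, h2, h3, Nat.testBit_and]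

theorem cnt_clear_lowbit (m : Nat) (hm : m ≠ 0) : pvCnt (m &&& (m - 1)) + 1 = pvCnt m := by
  induction m using Nat.strong_induction_on with
  | _ m ih =>
    rcases Nat.even_or_odd m with ⟨k, hk⟩ | ⟨k, hk⟩
    · subst hk
      have hk0 : k ≠ 0 := by omega
      have hsub : k + k - 1 = 2 * k - 1 := by ring_nf
      have : k + k = 2 * k := by ring
      rw [this, land_even k, cnt_even, cnt_even,
        ih k (by omega) hk0]
    · subst hk
      have : 2 * k + 1 - 1 = 2 * k := by omega
      rw [this, land_odd, cnt_even, cnt_odd]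

theorem kern_eq_cnt (c : Nat) : ∀ ones : Nat, pvKern c ones = ones + pvCnt c := by
  induction c using Nat.strong_induction_on with
  | _ c ih =>
    intro ones
    rw [pvKern]
    by_cases h : c = 0
    · simp [h, pvCnt]
    · rw [if_neg h, ih (c &&& (c - 1))
        (Nat.lt_of_le_of_lt (Nat.and_le_right) (Nat.pred_lt h))]
      have := cnt_clear_lowbit c h
      omega

-- ===== VERDICT (by name: the statement is the Claim_ definition above) =====
theorem ones_pvBin (n : Int) :
    (pvBin n).foldl (fun ones c => if c = '1' then ones + 1 else ones) 0 = pvCnt n.natAbs := by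
  unfold pvBin
  by_cases h0 : n.natAbs = 0
  · rw [if_pos h0, h0]
    have : pvCnt 0 = 0 := by rw [pvCnt]; simp
    by_cases hneg : n < 0 <;>
      simp [hneg, this]
  · rw [if_neg h0]
    by_cases hneg : n < 0
    · rw [if_pos hneg, List.foldl_append]
      norm_num [List.foldl_cons, List.foldl_nil, foldl_binDigits]
      decide
    · rw [if_neg hneg, List.foldl_append]
      norm_num [List.foldl_cons, List.foldl_nil, foldl_binDigits]
      decide

theorem isWall_spec : Claim_equal_isWall := by
  intro x y _
  unfold Spec_isWall isWall isWall_alt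
  simp only [ones_pvBin, kern_eq_cnt, Nat.zero_add]
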